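-- pv_equiv track=rewrite | github.com/Isisesth/panoramic | app.py | suggest_mapping
-- ===== SOURCE A (Python) =====
-- def suggest_mapping(df_cols, synonyms):
--     norm = {c: c.strip().lower() for c in df_cols if isinstance(c, str)}
--     for syn in synonyms:
--         syn_l = syn.strip().lower()
--         for col, col_l in norm.items():
--             if col_l == syn_l:
--                 return col
--     for syn in synonyms:
--         syn_l = syn.strip().lower()
--         for col, col_l in norm.items():
--             if syn_l in col_l:
--                 return col
--     return None
-- ===== SOURCE B (Python) =====
-- def suggest_mapping(df_cols, synonyms):
--     cols = [(c, c.strip().lower()) for c in df_cols if isinstance(c, str)]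
--     exact = {}
--     for col, col_l in cols:
--         exact.setdefault(col_l, col)
--     fallback = None
--     for syn in synonyms:
--         s = syn.strip().lower()
--         if s in exact:
--             return exact[s]
--         if fallback is None:
--             for col, col_l in cols:
--                 if s in col_l:
--                     fallback = col
--                     break
--     return fallback
-- ===== Notes on version B (the rewrite author's own statement) =====
-- stated objective: alternative
-- what changed: A's two synonym-major passes (exact scan of the dict, then substring scan) become one fused pass over the synonyms that returns exact hits via a precomputed reverse index (normalized value -> first column) and accumulates the first substring hit as a fallback.
import Mathlib
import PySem

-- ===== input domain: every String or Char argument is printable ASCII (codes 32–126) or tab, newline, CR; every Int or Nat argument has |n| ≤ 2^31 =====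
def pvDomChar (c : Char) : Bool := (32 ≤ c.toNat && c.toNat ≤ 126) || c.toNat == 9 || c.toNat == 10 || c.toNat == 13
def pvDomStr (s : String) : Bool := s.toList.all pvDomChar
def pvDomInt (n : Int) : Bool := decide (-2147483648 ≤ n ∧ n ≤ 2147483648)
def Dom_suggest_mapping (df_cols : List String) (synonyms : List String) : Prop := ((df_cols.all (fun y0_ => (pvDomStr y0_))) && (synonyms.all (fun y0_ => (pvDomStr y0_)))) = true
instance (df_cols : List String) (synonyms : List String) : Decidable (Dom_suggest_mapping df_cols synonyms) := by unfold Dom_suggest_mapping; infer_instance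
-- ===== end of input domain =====

-- B replaces A's two synonym-major passes by one fused pass over the synonyms, with a reverse
-- index (normalized value -> first column) for the exact phase and a first-substring-hit
-- accumulator for the fallback phase (objective: alternative decomposition, same cost class).

-- c.strip().lower(), the normalization both Pythons write inline
def pvNorm (c : String) : String := PySem.Str.lower (PySem.Str.strip c)

-- ===== PORT A =====
-- (A's 'isinstance(c, str)' guard is vacuous here: df_cols : List String)
def suggest_mapping (df_cols : List String) (synonyms : List String) : Option String :=
  let norm := df_cols.foldl (fun d c => d.insert c (pvNorm c)) PySem.Dict.empty
  match synonyms.findSome? (fun syn =>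
      let syn_l := pvNorm syn
      (norm.items.find? (fun p => p.2 == syn_l)).map Prod.fst) with
  | some col => some col
  | none =>
    synonyms.findSome? (fun syn =>
      let syn_l := pvNorm syn
      (norm.items.find? (fun p => PySem.Str.isIn syn_l p.2)).map Prod.fst)

-- ===== PORT B =====
-- Source B's fused loop: return on an exact hit via the reverse index `exact`, otherwise remember
-- the first substring hit in `fallback` and return it after the loop
def suggest_mapping_altLoop (exact : PySem.Dict String String)
    (cols : List (String × String)) : List String → Option String → Option String
  | [], fallback => fallback
  | syn :: rest, fallback =>
    let s := pvNorm syn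
    match exact.get? s with
    | some col => some col
    | none =>
      suggest_mapping_altLoop exact cols rest
        (if fallback.isNone then (cols.find? (fun p => PySem.Str.isIn s p.2)).map Prod.fst
         else fallback)

def suggest_mapping_alt (df_cols : List String) (synonyms : List String) : Option String :=
  let cols := df_cols.map (fun c => (c, pvNorm c))
  let exact := cols.foldl (fun e p => e.setdefault p.2 p.1) PySem.Dict.empty
  suggest_mapping_altLoop exact cols synonyms none

-- ===== PRECONDITION & SPEC =====
def Spec_suggest_mapping (df_cols : List String) (synonyms : List String) (out : Option String) : Prop := out = suggest_mapping_alt df_cols synonyms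
instance (df_cols : List String) (synonyms : List String) (out : Option String) : Decidable (Spec_suggest_mapping df_cols synonyms out) := by unfold Spec_suggest_mapping; infer_instance

-- ===== CLAIM (what is proved, stated in full; the proofs are below) =====
def Claim_equal_suggest_mapping : Prop := ∀ (df_cols : List String) (synonyms : List String), Dom_suggest_mapping df_cols synonyms → Spec_suggest_mapping df_cols synonyms (suggest_mapping df_cols synonyms)

-- ===== LEMMAS AND PROOFS =====

-- B's setdefault loop builds the reverse index: looking up s gives the first pair whose
-- normalized value is s (on top of whatever the accumulator already binds).
theorem pv_get_exact (ps : List (String × String)) :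
    ∀ (e : PySem.Dict String String) (s : String),
      (ps.foldl (fun e p => e.setdefault p.2 p.1) e).get? s
        = (e.get? s).or ((ps.find? (fun p => p.2 == s)).map Prod.fst) := by
  induction ps with
  | nil => intro e s; simp
  | cons p t ih =>
    intro e s
    rw [List.foldl_cons, ih]
    by_cases h : s = p.2
    · rw [h, PySem.Dict.get?_setdefault_self]
      cases he : e.get? p.2 <;> simp
    · rw [PySem.Dict.get?_setdefault_of_ne _ _ h]
      simp [Ne.symm h]

-- A's dict `norm` deduplicates repeated column names, but a repeated name contributes the
-- identical pair (c, pvNorm c), so any find? over norm.items agrees with find? over the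
-- plain pair list B scans.
theorem pv_find_norm (cs : List String) :
    ∀ (d : PySem.Dict String String) (L : List (String × String)),
      (∀ p ∈ d.items, p.2 = pvNorm p.1) →
      (∀ q : String × String → Bool, d.items.find? q = L.find? q) →
      ∀ q : String × String → Bool,
        (cs.foldl (fun d c => d.insert c (pvNorm c)) d).items.find? q
          = (L ++ cs.map (fun c => (c, pvNorm c))).find? q := by
  induction cs with
  | nil => intro d L hv hf q; simpa using hf q
  | cons c t ih =>
    intro d L hv hf q
    rw [List.foldl_cons, List.map_cons]
    have step : ∀ q : String × String → Bool,
        (d.insert c (pvNorm c)).items.find? q = (L ++ [(c, pvNorm c)]).find? q := by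
      intro q
      by_cases hc : d.contains c = true
      · rw [PySem.Dict.items_insert_of_contains _ _ hc]
        have heach : ∀ p ∈ d.items, (if p.1 == c then (c, pvNorm c) else p) = p := by
          intro p hp
          obtain ⟨p1, p2⟩ := p
          by_cases h1 : p1 = c
          · have h2 := hv _ hp; subst h1; simp at h2 ⊢; exact h2.symm
          · simp [h1]
        rw [List.map_congr_left heach]; simp only [List.map_id_fun', id]
        rw [List.find?_append, hf]
        cases hL : L.find? q
        · have hd : d.items.find? q = none := (hf q).trans hL
          have hmem : (c, pvNorm c) ∈ d.items := by
            have := (PySem.Dict.contains_iff_mem_keys d c).mp hc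
            simp only [PySem.Dict.keys, List.mem_map] at this
            obtain ⟨p, hp, h1⟩ := this
            have := hv p hp
            cases p; simp_all
          have hq : q (c, pvNorm c) = false := by
            rcases hq : q (c, pvNorm c) with _|_
            · rfl
            · exact absurd hd (by simp [List.find?_eq_none]; exact ⟨c, pvNorm c, hmem, hq⟩)
          simp [hq]
        · simp
      · rw [PySem.Dict.items_insert_of_not_contains _ _ (by simpa using hc)]
        rw [List.find?_append, List.find?_append, hf]
    have hv' : ∀ p ∈ (d.insert c (pvNorm c)).items, p.2 = pvNorm p.1 := by
      intro p hp
      rcases (PySem.Dict.mem_items_insert d c (pvNorm c) p).mp hp with h | ⟨h, _⟩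
      · simp [h]
      · exact hv p h
    have := ih (d.insert c (pvNorm c)) (L ++ [(c, pvNorm c)]) hv' step q
    simpa [List.append_assoc] using this

-- B's fused loop = A's shape: exact pass first, then the fallback accumulator, then the
-- substring pass.
theorem pv_loop (exact : PySem.Dict String String) (cols : List (String × String)) :
    ∀ (syns : List String) (fb : Option String),
      suggest_mapping_altLoop exact cols syns fb
        = match syns.findSome? (fun σ => exact.get? (pvNorm σ)) with
          | some c => some c
          | none =>
            match fb with
            | some f => some f
            | none =>
              syns.findSome? (fun σ =>
                (cols.find? (fun p => PySem.Str.isIn (pvNorm σ) p.2)).map Prod.fst) := by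
  intro syns
  induction syns with
  | nil => intro fb; cases fb <;> simp [suggest_mapping_altLoop]
  | cons σ t ih =>
    intro fb
    rw [suggest_mapping_altLoop]
    simp only [List.findSome?_cons]
    cases h : exact.get? (pvNorm σ) with
    | some c => simp
    | none =>
      rw [ih]
      cases fb with
      | some f => simp
      | none =>
        simp only [Option.isNone_none, if_pos]
        cases hs : (cols.find? (fun p => PySem.Str.isIn (pvNorm σ) p.2)).map Prod.fst <;>
          cases ht : t.findSome? (fun σ => exact.get? (pvNorm σ)) <;> simp

-- ===== VERDICT (by name: the statement is the Claim_ definition above) =====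
theorem suggest_mapping_spec : Claim_equal_suggest_mapping := by
  intro df_cols synonyms _
  unfold Spec_suggest_mapping suggest_mapping suggest_mapping_alt
  rw [pv_loop]
  have hnorm := pv_find_norm df_cols PySem.Dict.empty []
    (by simp [PySem.Dict.empty]) (by simp [PySem.Dict.empty])
  simp only [List.nil_append] at hnorm
  have hexact : ∀ s, ((df_cols.map (fun c => (c, pvNorm c))).foldl
      (fun e p => e.setdefault p.2 p.1) PySem.Dict.empty).get? s
        = ((df_cols.map (fun c => (c, pvNorm c))).find? (fun p => p.2 == s)).map Prod.fst := by
    intro s; rw [pv_get_exact]; simp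
  simp only [hnorm, hexact]
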